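-- pv_equiv track=rewrite | github.com/kadubon/sovereign-epistemic-commons-poc | sec_poc/simulator.py | truth_at_step
-- ===== SOURCE A (Python) =====
-- def truth_at_step(plan: dict[int, list[tuple[str, str]]], base_truths: dict[str, str], step: int) -> dict[str, str]:
--     truths = dict(base_truths)
--     for event_step in sorted(plan):
--         if event_step > step:
--             break
--         for key, value in plan[event_step]:
--             truths[key] = value
--     return truths
-- ===== SOURCE B (Python) =====
-- def truth_at_step(plan: dict[int, list[tuple[str, str]]], base_truths: dict[str, str], step: int) -> dict[str, str]:
--     # Different algorithm: instead of replaying events forward and overwriting,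
--     # flatten the applicable events once, fix each event key's FINAL value by a
--     # single reverse first-wins pass, then assemble the result non-destructively
--     # over the candidate keys (base keys, then event keys) in output order.
--     events = []
--     for s in sorted(plan):
--         if s <= step:
--             events.extend(plan[s])
--     latest = {}
--     for k, v in reversed(events):
--         if k not in latest:
--             latest[k] = v
--     result = {}
--     for key in list(base_truths) + [k for k, _ in events]:
--         if key not in result:
--             result[key] = latest[key] if key in latest else base_truths[key]
--     return result
-- ===== Notes on version B (the rewrite author's own statement) =====
-- stated objective: alternative
-- what changed: Instead of replaying events forward and overwriting a dict, B flattens the applicable events once, fixes each event key's final value by a single reverse first-wins pass, and then assembles the result non-destructively over the candidate keys (base keys, then event keys) in output order.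
import Mathlib
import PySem

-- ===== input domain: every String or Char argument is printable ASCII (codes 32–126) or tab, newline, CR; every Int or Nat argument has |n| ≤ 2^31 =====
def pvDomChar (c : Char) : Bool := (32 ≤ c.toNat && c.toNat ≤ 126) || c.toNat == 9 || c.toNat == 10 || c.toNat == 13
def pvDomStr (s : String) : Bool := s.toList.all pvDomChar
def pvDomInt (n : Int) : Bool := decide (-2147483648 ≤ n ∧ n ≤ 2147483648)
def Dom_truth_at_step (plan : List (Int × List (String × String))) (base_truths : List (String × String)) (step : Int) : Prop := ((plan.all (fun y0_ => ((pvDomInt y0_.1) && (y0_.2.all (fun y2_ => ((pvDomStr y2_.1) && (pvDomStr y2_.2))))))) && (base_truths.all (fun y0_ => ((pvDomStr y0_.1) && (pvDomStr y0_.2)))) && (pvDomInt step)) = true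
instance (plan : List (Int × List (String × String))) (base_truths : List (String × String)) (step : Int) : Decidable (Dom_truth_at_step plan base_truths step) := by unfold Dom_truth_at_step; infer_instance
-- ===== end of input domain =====

-- B resolves each output key's final value directly (reversed-event search with base
-- fallback) instead of A's forward replay that overwrites a dict; alternative, not faster.

-- ===== PORT A =====
def truth_at_step (plan : List (Int × List (String × String))) (base_truths : List (String × String)) (step : Int) : List (String × String) :=
  let planD : PySem.Dict Int (List (String × String)) := PySem.Dict.ofList plan
  let truths0 : PySem.Dict String String := PySem.Dict.ofList base_truths
  -- 'for event_step in sorted(plan): if event_step > step: break …' — the body runs exactly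
  -- on the takeWhile (≤ step) prefix of the sorted keys (break stops at the first key > step)
  let upto := (PySem.List.sorted planD.keys (fun x => x) false).takeWhile (fun s => decide (s ≤ step))
  -- plan[event_step]: event_step is a key of planD, so getD is exact (no KeyError possible)
  (upto.foldl (fun t s => (planD.getD s []).foldl (fun t kv => t.insert kv.1 kv.2) t) truths0).items

-- ===== PORT B =====
def truth_at_step_alt (plan : List (Int × List (String × String))) (base_truths : List (String × String)) (step : Int) : List (String × String) :=
  let planD : PySem.Dict Int (List (String × String)) := PySem.Dict.ofList plan
  -- 'for s in sorted(plan): if s <= step: events.extend(plan[s])' (s is a key, getD exact)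
  let events := (PySem.List.sorted planD.keys (fun x => x) false).foldl
      (fun acc s => if s ≤ step then acc ++ planD.getD s [] else acc) []
  let baseD : PySem.Dict String String := PySem.Dict.ofList base_truths
  -- 'for k, v in reversed(events): if k not in latest: latest[k] = v' (first wins)
  let latest := events.reverse.foldl
      (fun d kv => if d.contains kv.1 then d else d.insert kv.1 kv.2)
      (PySem.Dict.empty : PySem.Dict String String)
  -- 'for key in list(base_truths) + [k for k, _ in events]: if key not in result: …'
  -- 'latest[key] if key in latest else base_truths[key]': both lookups hit existing keys, so getD is exact
  let cands := baseD.keys ++ events.map Prod.fst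
  (cands.foldl (fun result key =>
      if result.contains key then result
      else result.insert key
        (if latest.contains key then latest.getD key "" else baseD.getD key ""))
    PySem.Dict.empty).items

-- ===== PRECONDITION & SPEC =====
def Spec_truth_at_step (plan : List (Int × List (String × String))) (base_truths : List (String × String)) (step : Int) (out : List (String × String)) : Prop := out = truth_at_step_alt plan base_truths step
instance (plan : List (Int × List (String × String))) (base_truths : List (String × String)) (step : Int) (out : List (String × String)) : Decidable (Spec_truth_at_step plan base_truths step out) := by unfold Spec_truth_at_step; infer_instance

-- ===== CLAIM (what is proved, stated in full; the proofs are below) =====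
def Claim_equal_truth_at_step : Prop := ∀ (plan : List (Int × List (String × String))) (base_truths : List (String × String)) (step : Int), Dom_truth_at_step plan base_truths step → Spec_truth_at_step plan base_truths step (truth_at_step plan base_truths step)

-- ===== LEMMAS AND PROOFS =====

-- On an ascending list, the break prefix (takeWhile) is the filter.
lemma tw_eq_filter (step : Int) : ∀ (l : List Int), l.Pairwise (· ≤ ·) →
    l.takeWhile (fun s => decide (s ≤ step)) = l.filter (fun s => decide (s ≤ step))
  | [], _ => rfl
  | a :: t, h => by
    rcases List.pairwise_cons.mp h with ⟨ha, ht⟩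
    by_cases hle : a ≤ step
    · simp [hle, tw_eq_filter step t ht]
    · have h2 : t.filter (fun s => decide (s ≤ step)) = [] :=
        List.filter_eq_nil_iff.mpr (fun b hb => by
          simpa using not_le.mpr (lt_of_lt_of_le (not_le.mp hle) (ha b hb)))
      simp [hle, h2]

-- B's extend-if loop builds exactly the flatMap of the filtered keys.
lemma foldl_extend_if (step : Int) (g : Int → List (String × String)) :
    ∀ (l : List Int) (acc : List (String × String)),
    l.foldl (fun acc s => if s ≤ step then acc ++ g s else acc) acc
      = acc ++ (l.filter (fun s => decide (s ≤ step))).flatMap g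
  | [], acc => by simp
  | a :: t, acc => by
    by_cases hle : a ≤ step <;>
      simp [hle, foldl_extend_if step g t]

-- lookup after A's forward insert loop: last write wins, else the start dict
lemma get?_foldl_insert : ∀ (l : List (String × String)) (d : PySem.Dict String String) (k : String),
    (l.foldl (fun t kv => t.insert kv.1 kv.2) d).get? k
      = ((l.reverse.find? (fun kv => kv.1 == k)).map (·.2)).or (d.get? k)
  | [], d, k => by simp
  | e :: t, d, k => by
    simp only [List.foldl_cons, get?_foldl_insert t (d.insert e.1 e.2) k, List.reverse_cons,
      List.find?_append]
    by_cases hk : e.1 = k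
    · subst hk
      cases hf : t.reverse.find? (fun kv => kv.1 == e.1) with
      | none => simp [PySem.Dict.get?_insert_self]
      | some p => simp
    · have : (e.1 == k) = false := by simpa using hk
      cases hf : t.reverse.find? (fun kv => kv.1 == k) with
      | none => simp [this, PySem.Dict.get?_insert_of_ne d e.2 (fun h => hk h.symm)]
      | some p => simp

-- lookup after B's reverse first-wins loop: the first occurrence wins
lemma get?_foldl_firstWins : ∀ (l : List (String × String)) (d : PySem.Dict String String) (k : String),
    (l.foldl (fun d kv => if d.contains kv.1 then d else d.insert kv.1 kv.2) d).get? k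
      = (d.get? k).or ((l.find? (fun kv => kv.1 == k)).map (·.2))
  | [], d, k => by simp
  | e :: t, d, k => by
    simp only [List.foldl_cons, List.find?_cons]
    by_cases hc : d.contains e.1 = true
    · rw [if_pos hc, get?_foldl_firstWins t d k]
      by_cases hk : e.1 = k
      · subst hk
        have : d.get? e.1 ≠ none := by
          rw [Ne, PySem.Dict.get?_eq_none_iff_contains]; simp [hc]
        cases hq : d.get? e.1 with
        | none => exact absurd hq this
        | some v => simp
      · have : (e.1 == k) = false := by simpa using hk
        simp [this]
    · rw [if_neg hc, get?_foldl_firstWins t (d.insert e.1 e.2) k]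
      by_cases hk : e.1 = k
      · subst hk
        have hd : d.get? e.1 = none := by
          rw [PySem.Dict.get?_eq_none_iff_contains]; simpa using hc
        simp [PySem.Dict.get?_insert_self, hd]
      · have hbe : (e.1 == k) = false := by simpa using hk
        rw [PySem.Dict.get?_insert_of_ne d e.2 (fun h => hk h.symm)]
        simp [hbe]

-- lookup after B's insert-if-new loop with a key-only value function
lemma get?_foldl_insertNew (g : String → String) :
    ∀ (l : List String) (d : PySem.Dict String String) (k : String),
    (l.foldl (fun r x => if r.contains x then r else r.insert x (g x)) d).get? k
      = (d.get? k).or (if k ∈ l then some (g k) else none)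
  | [], d, k => by simp
  | x :: t, d, k => by
    simp only [List.foldl_cons]
    by_cases hc : d.contains x = true
    · rw [if_pos hc, get?_foldl_insertNew g t d k]
      by_cases hk : k = x
      · subst hk
        have : d.get? k ≠ none := by
          rw [Ne, PySem.Dict.get?_eq_none_iff_contains]; simp [hc]
        cases hq : d.get? k with
        | none => exact absurd hq this
        | some v => simp
      · simp [List.mem_cons, hk]
    · rw [if_neg hc, get?_foldl_insertNew g t (d.insert x (g x)) k]
      by_cases hk : k = x
      · subst hk
        have hd : d.get? k = none := by
          rw [PySem.Dict.get?_eq_none_iff_contains]; simpa using hc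
        simp [PySem.Dict.get?_insert_self, hd]
      · rw [PySem.Dict.get?_insert_of_ne d (g x) hk]
        simp [List.mem_cons, hk]

-- keys after B's insert-if-new loop: first-insertion order, like Set.update
lemma keys_foldl_insertNew (g : String → String) :
    ∀ (l : List String) (d : PySem.Dict String String),
    (l.foldl (fun r x => if r.contains x then r else r.insert x (g x)) d).keys
      = PySem.Set.update d.keys l
  | [], d => by simp [PySem.Set.update]
  | x :: t, d => by
    rw [PySem.Set.update_cons]
    by_cases hc : d.contains x = true
    · have hmem : x ∈ d.keys := (PySem.Dict.contains_iff_mem_keys d x).mp hc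
      simp only [List.foldl_cons, if_pos hc, keys_foldl_insertNew g t d]
      simp [PySem.Set.add, hmem]
    · have hnm : x ∉ d.keys := fun h => hc ((PySem.Dict.contains_iff_mem_keys d x).mpr h)
      simp only [List.foldl_cons, if_neg hc, keys_foldl_insertNew g t (d.insert x (g x))]
      rw [PySem.Dict.keys_insert_of_not_contains d (g x) (by simpa using hc)]
      simp [PySem.Set.add, hnm]

theorem truth_at_step_spec : Claim_equal_truth_at_step := by
  intro plan base_truths step _
  unfold Spec_truth_at_step truth_at_step truth_at_step_alt
  dsimp only
  set planD : PySem.Dict Int (List (String × String)) := PySem.Dict.ofList plan with hplanD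
  set baseD : PySem.Dict String String := PySem.Dict.ofList base_truths with hbaseD
  -- both sides apply the same flattened event list E
  rw [tw_eq_filter step _ (PySem.List.sorted_pairwise planD.keys (fun x => x)),
    foldl_extend_if step (fun s => planD.getD s [])]
  simp only [List.nil_append]
  set E := ((PySem.List.sorted planD.keys (fun x => x) false).filter
    (fun s => decide (s ≤ step))).flatMap (fun s => planD.getD s []) with hE
  -- A's nested loop is one insert loop over E
  have hA : (((PySem.List.sorted planD.keys (fun x => x) false).filter
        (fun s => decide (s ≤ step))).foldl
        (fun t s => (planD.getD s []).foldl (fun t kv => t.insert kv.1 kv.2) t) baseD)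
      = E.foldl (fun t kv => t.insert kv.1 kv.2) baseD := by
    rw [hE, List.foldl_flatMap]
  rw [hA]
  set dA := E.foldl (fun t kv => t.insert kv.1 kv.2) baseD with hdA
  -- B's 'latest' dict and its key-only value function g
  set latest := E.reverse.foldl
      (fun d kv => if d.contains kv.1 then d else d.insert kv.1 kv.2)
      (PySem.Dict.empty : PySem.Dict String String) with hlatest
  set g : String → String := fun key =>
    if latest.contains key then latest.getD key "" else baseD.getD key "" with hg
  set cands := baseD.keys ++ E.map Prod.fst with hcands
  set dB := cands.foldl (fun r x => if r.contains x then r else r.insert x (g x))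
    PySem.Dict.empty with hdB
  -- the two key lists coincide
  have hkA : dA.keys = PySem.Set.update baseD.keys (E.map Prod.fst) := by
    rw [hdA]
    exact PySem.Dict.keys_foldl_insert_key E Prod.fst (fun d kv => kv.2) baseD
  have hkB : dB.keys = PySem.Set.update baseD.keys (E.map Prod.fst) := by
    rw [hdB, keys_foldl_insertNew g cands PySem.Dict.empty, hcands]
    rw [show (PySem.Dict.empty : PySem.Dict String String).keys = ([] : List String) from rfl]
    rw [PySem.Set.update_nil_left, PySem.Set.ofList_append]
    congr 1
    rw [← PySem.Set.update_nil_left,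
      PySem.Set.update_eq_append_of_disjoint _ _ (PySem.Dict.nodup_keys_ofList base_truths)
        (by simp), List.nil_append]
  have hnodA : dA.keys.Nodup := by
    rw [hdA]
    exact PySem.Dict.nodup_keys_foldl_insert_key E Prod.fst (fun d kv => kv.2) baseD
      (PySem.Dict.nodup_keys_ofList base_truths)
  have hnodB : dB.keys.Nodup := by rw [hkB, ← hkA]; exact hnodA
  -- and the lookups agree on every key of the result
  have hget : ∀ k, k ∈ dA.keys → dA.get? k = dB.get? k := by
    intro k hkmem
    have hkc : k ∈ cands := by
      rw [hkA] at hkmem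
      rcases (PySem.Set.mem_update _ _ _).mp hkmem with h | h
      · exact List.mem_append.mpr (Or.inl h)
      · exact List.mem_append.mpr (Or.inr h)
    have hBget : dB.get? k = some (g k) := by
      rw [hdB, get?_foldl_insertNew g cands PySem.Dict.empty k]
      simp [hkc, PySem.Dict.get?_empty]
    have hAget : dA.get? k
        = ((E.reverse.find? (fun kv => kv.1 == k)).map (·.2)).or (baseD.get? k) := by
      rw [hdA, get?_foldl_insert]
    have hlat : latest.get? k = (E.reverse.find? (fun kv => kv.1 == k)).map (·.2) := by
      rw [hlatest, get?_foldl_firstWins]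
      simp [PySem.Dict.get?_empty]
    rw [hAget, hBget, hg]
    cases hf : E.reverse.find? (fun kv => kv.1 == k) with
    | some p =>
      have hc : latest.contains k = true := by
        rw [PySem.Dict.contains_eq_isSome_get?, hlat, hf]; rfl
      simp [hf, hc, PySem.Dict.getD_eq_get?_getD, hlat]
    | none =>
      -- no event touches k, so k is a base key and base lookup succeeds
      have hkE : k ∉ E.map Prod.fst := by
        intro hmem
        rcases List.mem_map.mp hmem with ⟨kv, hkv, hkey⟩
        have := List.find?_eq_none.mp hf kv (List.mem_reverse.mpr hkv)
        simp [hkey] at this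
      have hkb : k ∈ baseD.keys := by
        rw [hkA] at hkmem
        rcases (PySem.Set.mem_update _ _ _).mp hkmem with h | h
        · exact h
        · exact absurd h hkE
      have hsome : (baseD.get? k).isSome := by
        rw [← PySem.Dict.contains_eq_isSome_get?]
        exact (PySem.Dict.contains_iff_mem_keys baseD k).mpr hkb
      have hc : latest.contains k = false := by
        rw [PySem.Dict.contains_eq_isSome_get?, hlat, hf]; rfl
      cases hb : baseD.get? k with
      | none => rw [hb] at hsome; simp at hsome
      | some v => simp [hb, hc, PySem.Dict.getD_eq_get?_getD]
  -- items are keys paired with lookups, on both sides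
  rw [PySem.Dict.items_eq_map_keys dA hnodA "", PySem.Dict.items_eq_map_keys dB hnodB "",
    hkA, hkB]
  refine List.map_congr_left (fun k hk => ?_)
  have hk' : k ∈ dA.keys := by rw [hkA]; exact hk
  simp [PySem.Dict.getD_eq_get?_getD, hget k hk']
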